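-- pv_equiv track=rewrite | github.com/CWatt250/watt-spec-parser | src/spec_parser/extract/md_table_parser.py | _extract_table_blocks
-- ===== SOURCE A (Python) =====
-- def _is_table_line(line: str) -> bool:
--     return line.lstrip().startswith("|")
--
-- def _extract_table_blocks(text: str) -> list[list[str]]:
--     """Return each contiguous group of table lines as a list-of-line-lists."""
--     blocks: list[list[str]] = []
--     current: list[str] = []
--     for line in text.splitlines():
--         if _is_table_line(line):
--             current.append(line)
--         else:
--             if current:
--                 blocks.append(current)
--                 current = []
--     if current:
--         blocks.append(current)
--     return blocks
-- ===== SOURCE B (Python) =====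
-- def _is_table_line(line: str) -> bool:
--     return line.lstrip().startswith("|")
--
-- def _extract_table_blocks(text: str) -> list[list[str]]:
--     """Span-based grouping: find each maximal run of table lines and slice it out."""
--     lines = text.splitlines()
--     blocks: list[list[str]] = []
--     i, n = 0, len(lines)
--     while i < n:
--         if _is_table_line(lines[i]):
--             j = i + 1
--             while j < n and _is_table_line(lines[j]):
--                 j += 1
--             blocks.append(lines[i:j])
--             i = j
--         else:
--             i += 1
--     return blocks
-- ===== Notes on version B (the rewrite author's own statement) =====
-- stated objective: alternative
-- what changed: Replaced A's flush-on-boundary state machine (blocks/current accumulators with two flush sites) by a span-based scan that slices out each maximal run of table lines directly.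
import Mathlib
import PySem

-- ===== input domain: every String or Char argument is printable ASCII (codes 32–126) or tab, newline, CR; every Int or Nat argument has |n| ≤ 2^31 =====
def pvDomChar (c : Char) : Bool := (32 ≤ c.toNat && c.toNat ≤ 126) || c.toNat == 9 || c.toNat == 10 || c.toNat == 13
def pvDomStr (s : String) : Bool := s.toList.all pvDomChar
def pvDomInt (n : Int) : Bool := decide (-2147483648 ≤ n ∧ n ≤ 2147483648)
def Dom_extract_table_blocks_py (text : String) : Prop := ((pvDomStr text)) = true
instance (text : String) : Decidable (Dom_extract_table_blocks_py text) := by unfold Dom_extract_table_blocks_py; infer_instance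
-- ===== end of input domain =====

-- B replaces A's flush-on-boundary accumulator state machine by a span-based scan
-- that slices out each maximal run of table lines directly (alternative decomposition, same O(n) cost).


-- ===== PORT A =====
-- shared helper _is_table_line (identical in both Pythons)
def is_table_line_py (line : String) : Bool :=
  PySem.Str.startswith (PySem.Str.lstrip line) "|"

-- A's loop body: append to current, or flush current into blocks on a non-table line
def stepA (s : List (List String) × List String) (line : String) :
    List (List String) × List String :=
  if is_table_line_py line then (s.1, s.2 ++ [line])
  else if s.2 = [] then s else (s.1 ++ [s.2], [])

-- A's trailing flush
def finishA (s : List (List String) × List String) : List (List String) :=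
  if s.2 = [] then s.1 else s.1 ++ [s.2]

def extract_table_blocks_py (text : String) : List (List String) :=
  finishA ((PySem.Str.splitlines text).foldl stepA ([], []))

-- ===== PORT B =====
-- B's outer loop: on a table line take the whole maximal run (inner while = takeWhile,
-- resuming at j = dropWhile), otherwise skip the line
def goB : List String → List (List String)
  | [] => []
  | l :: rest =>
    if is_table_line_py l then
      (l :: rest.takeWhile is_table_line_py) :: goB (rest.dropWhile is_table_line_py)
    else goB rest
termination_by lines => lines.length
decreasing_by
  · exact Nat.lt_succ_of_le (List.length_dropWhile_le _ _)
  · simp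

def extract_table_blocks_py_alt (text : String) : List (List String) :=
  goB (PySem.Str.splitlines text)

-- ===== PRECONDITION & SPEC =====
def Spec_extract_table_blocks_py (text : String) (out : List (List String)) : Prop := out = extract_table_blocks_py_alt text
instance (text : String) (out : List (List String)) : Decidable (Spec_extract_table_blocks_py text out) := by unfold Spec_extract_table_blocks_py; infer_instance

-- ===== CLAIM (what is proved, stated in full; the proofs are below) =====
def Claim_equal_extract_table_blocks_py : Prop := ∀ (text : String), Dom_extract_table_blocks_py text → Spec_extract_table_blocks_py text (extract_table_blocks_py text)

-- ===== LEMMAS AND PROOFS =====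

-- how B groups the remaining lines given A's pending (table-line) accumulator `cur`
def mergeB (cur : List String) (lines : List String) : List (List String) :=
  if cur = [] then goB lines
  else (cur ++ lines.takeWhile is_table_line_py) :: goB (lines.dropWhile is_table_line_py)

-- loop invariant: A's fold-then-flush from state (blocks, cur) is blocks ++ B's grouping
lemma loop_eq (lines : List String) : ∀ (blocks : List (List String)) (cur : List String),
    finishA (lines.foldl stepA (blocks, cur)) = blocks ++ mergeB cur lines := by
  induction lines with
  | nil =>
    intro blocks cur
    by_cases h : cur = [] <;> simp [finishA, mergeB, goB, h]
  | cons l rest ih =>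
    intro blocks cur
    by_cases hp : is_table_line_py l = true
    · have hs : stepA (blocks, cur) l = (blocks, cur ++ [l]) := by simp [stepA, hp]
      rw [List.foldl_cons, hs, ih]
      by_cases h : cur = [] <;>
        simp [mergeB, goB, h, hp]
    · have hs : stepA (blocks, cur) l =
          (if cur = [] then blocks else blocks ++ [cur], ([] : List String)) := by
        by_cases h : cur = [] <;> simp [stepA, hp, h]
      rw [List.foldl_cons, hs, ih]
      by_cases h : cur = [] <;>
        simp [mergeB, goB, h, hp]

-- ===== VERDICT (by name: the statement is the Claim_ definition above) =====
theorem extract_table_blocks_py_spec : Claim_equal_extract_table_blocks_py := by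
  intro text _
  unfold Spec_extract_table_blocks_py extract_table_blocks_py extract_table_blocks_py_alt
  rw [loop_eq]
  simp [mergeB]
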